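-- pv_equiv track=rewrite | github.com/clementetienam/physicsnemo | examples/reservoir_simulation/Norne/src/compare/batch/misc_gather.py | process_data2
-- ===== SOURCE A (Python) =====
-- def process_data2(data):
--     well_indices = {}
--     for entry in data:
--         well_name = entry[0]
--         if well_name not in well_indices:
--             well_indices[well_name] = []
--         i_index = int(entry[1]) - 1  # Convert to zero-based index
--         j_index = int(entry[2]) - 1  # Convert to zero-based index
--         well_indices[well_name].append((i_index, j_index))
--     return well_indices
-- ===== SOURCE B (Python) =====
-- def process_data2(data):
--     # Grouping by two passes: ordered-distinct well names first, then one
--     # filtering comprehension per name, instead of incremental dict building.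
--     names = list(dict.fromkeys(entry[0] for entry in data))
--     return {
--         name: [(int(entry[1]) - 1, int(entry[2]) - 1)
--                for entry in data if entry[0] == name]
--         for name in names
--     }
-- ===== Notes on version B (the rewrite author's own statement) =====
-- stated objective: alternative
-- what changed: Replaces A's single-pass incremental dict accumulation (membership test + append per row) with a two-pass grouping: collect the distinct well names in first-occurrence order, then build each group by one filtering comprehension over the data.
import Mathlib
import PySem

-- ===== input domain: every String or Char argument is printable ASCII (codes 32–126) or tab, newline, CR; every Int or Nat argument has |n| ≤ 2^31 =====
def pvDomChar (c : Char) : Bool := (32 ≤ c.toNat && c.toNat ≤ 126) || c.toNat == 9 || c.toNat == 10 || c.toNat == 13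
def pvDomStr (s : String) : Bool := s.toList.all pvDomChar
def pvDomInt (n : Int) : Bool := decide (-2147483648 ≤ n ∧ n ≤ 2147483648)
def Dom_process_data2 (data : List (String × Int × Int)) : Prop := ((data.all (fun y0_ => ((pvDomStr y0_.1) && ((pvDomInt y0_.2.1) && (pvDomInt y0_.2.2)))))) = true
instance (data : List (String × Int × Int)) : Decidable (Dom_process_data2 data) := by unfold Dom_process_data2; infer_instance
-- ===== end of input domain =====

-- B groups by two passes (ordered-distinct names, then a per-name filter) instead of A's
-- incremental dict accumulation; genuinely different structure, same result.

-- ===== PORT A =====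
-- A: one pass; for each entry, ensure the name is a key (with []), then append the pair.
def process_data2 (data : List (String × Int × Int)) : List (String × List (Int × Int)) :=
  (data.foldl
    (fun d e =>
      (if d.contains e.1 then d else d.insert e.1 []).modify e.1 []
        (fun l => l ++ [(e.2.1 - 1, e.2.2 - 1)]))
    PySem.Dict.empty).items

-- ===== PORT B =====
-- B: distinct names in first-occurrence order (dict.fromkeys = PySem.List.dedup),
-- then one filtering comprehension per name.
def process_data2_alt (data : List (String × Int × Int)) : List (String × List (Int × Int)) :=
  (PySem.List.dedup (data.map (fun e => e.1))).map
    (fun name => (name,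
      (data.filter (fun e => e.1 == name)).map (fun e => (e.2.1 - 1, e.2.2 - 1))))

-- ===== PRECONDITION & SPEC =====
def Spec_process_data2 (data : List (String × Int × Int)) (out : List (String × List (Int × Int))) : Prop := out = process_data2_alt data
instance (data : List (String × Int × Int)) (out : List (String × List (Int × Int))) : Decidable (Spec_process_data2 data out) := by unfold Spec_process_data2; infer_instance

-- ===== CLAIM (what is proved, stated in full; the proofs are below) =====
def Claim_equal_process_data2 : Prop := ∀ (data : List (String × Int × Int)), Dom_process_data2 data → Spec_process_data2 data (process_data2 data)

-- ===== LEMMAS AND PROOFS =====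

-- A's "if absent, insert []" guard followed by modify is just modify.
theorem pv_step_eq (d : PySem.Dict String (List (Int × Int))) (k : String)
    (f : List (Int × Int) → List (Int × Int)) :
    ((if d.contains k then d else d.insert k []).modify k [] f) = d.modify k [] f := by
  by_cases h : d.contains k = true
  · simp [h]
  · rw [Bool.not_eq_true] at h
    simp [h, PySem.Dict.modify, PySem.Dict.getD_insert_self,
      PySem.Dict.insert_insert_self, PySem.Dict.getD_of_not_contains d [] h]

theorem process_data2_eq_alt (data : List (String × Int × Int)) :
    process_data2 data = process_data2_alt data := by
  unfold process_data2 process_data2_alt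
  have hstep :
      (fun (d : PySem.Dict String (List (Int × Int))) (e : String × Int × Int) =>
        (if d.contains e.1 then d else d.insert e.1 []).modify e.1 []
          (fun l => l ++ [(e.2.1 - 1, e.2.2 - 1)]))
      = (fun d e => d.modify e.1 [] (fun l => l ++ [(e.2.1 - 1, e.2.2 - 1)])) :=
    funext fun d => funext fun e => pv_step_eq d e.1 _
  rw [hstep]
  have hmap :
      data.foldl (fun d e => d.modify e.1 [] (fun l => l ++ [(e.2.1 - 1, e.2.2 - 1)]))
        PySem.Dict.empty
      = (data.map (fun e => (e.1, (e.2.1 - 1, e.2.2 - 1)))).foldl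
          (fun d p => d.modify p.1 [] (fun l => l ++ [p.2])) PySem.Dict.empty := by
    rw [List.foldl_map]
  rw [hmap]
  set L := data.map (fun e => (e.1, (e.2.1 - 1, e.2.2 - 1))) with hL
  set D := L.foldl (fun d p => d.modify p.1 [] (fun l => l ++ [p.2])) PySem.Dict.empty with hD
  have hnodup : D.keys.Nodup := by
    rw [hD]
    exact PySem.Dict.nodup_keys_foldl_modify_key L Prod.fst [] (fun _ p => (· ++ [p.2])) _
      PySem.Dict.nodup_keys_empty
  have hkeys : D.keys = PySem.List.dedup (data.map (fun e => e.1)) := by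
    rw [hD]
    rw [PySem.Dict.keys_foldl_modify_key]
    simp [hL, PySem.List.dedup_eq_ofList, List.map_map, PySem.Set.update,
      PySem.Set.ofList_eq_foldl, Function.comp_def]
  have hgetD : ∀ k, D.getD k [] =
      (data.filter (fun e => e.1 == k)).map (fun e => (e.2.1 - 1, e.2.2 - 1)) := by
    intro k
    rw [hD, PySem.Dict.getD_foldl_modify_append]
    simp [hL, PySem.Dict.getD_empty, List.filter_map, List.map_map, Function.comp_def]
  rw [PySem.Dict.items_eq_map_keys D hnodup [], hkeys]
  exact List.map_congr_left fun k _ => by rw [hgetD k]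

-- ===== VERDICT (by name: the statement is the Claim_ definition above) =====
theorem process_data2_spec : Claim_equal_process_data2 := by
  intro data _
  unfold Spec_process_data2
  exact process_data2_eq_alt data
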